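-- pv_equiv track=rewrite | github.com/amenciag-hash/118B-Final | analyze_run_pretty.py | cummax
-- ===== SOURCE A (Python) =====
-- def cummax(xs):
--     out = []
--     m = None
--     for x in xs:
--         if m is None or x > m:
--             m = x
--         out.append(m)
--     return out
-- ===== SOURCE B (Python) =====
-- def cummax(xs):
--     return [max(xs[:i + 1]) for i in range(len(xs))]
-- ===== Notes on version B (the rewrite author's own statement) =====
-- stated objective: alternative
-- what changed: B computes each output element independently as max over the corresponding prefix via slicing, instead of threading a running-maximum accumulator through one pass.
import Mathlib
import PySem

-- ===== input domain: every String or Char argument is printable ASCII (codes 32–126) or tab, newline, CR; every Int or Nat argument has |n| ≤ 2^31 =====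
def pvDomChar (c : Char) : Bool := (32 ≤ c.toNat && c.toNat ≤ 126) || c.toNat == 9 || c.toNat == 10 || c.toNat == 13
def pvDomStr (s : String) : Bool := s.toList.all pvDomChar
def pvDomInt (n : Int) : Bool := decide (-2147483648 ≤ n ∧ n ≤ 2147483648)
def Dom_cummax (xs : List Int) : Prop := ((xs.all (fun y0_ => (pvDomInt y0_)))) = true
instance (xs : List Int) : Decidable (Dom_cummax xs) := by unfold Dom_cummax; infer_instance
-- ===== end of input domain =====

-- B recomputes each output element as max over the prefix slice xs[:i+1] (alternative decomposition, no running accumulator).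

-- ===== PORT A =====
-- one pass with a running maximum m (None until the first element), appending m each step
def cummax (xs : List Int) : List Int :=
  (xs.foldl (fun (st : List Int × Option Int) x =>
      let m : Int := match st.2 with
        | none => x
        | some m => if x > m then x else m
      (st.1 ++ [m], some m)) ([], none)).1

-- ===== PORT B =====
-- [max(xs[:i+1]) for i in range(len(xs))]; the slice is nonempty for every i in range,
-- so Python's max never raises; .getD 0 is the unreachable empty-list case of max?.
def cummax_alt (xs : List Int) : List Int :=
  (PySem.List.pyRange 0 (xs.length : Int) 1).map (fun i =>
    (PySem.List.max? (PySem.List.slice xs none (some (i + 1))) (fun y => y)).getD 0)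

-- ===== PRECONDITION & SPEC =====
def Spec_cummax (xs : List Int) (out : List Int) : Prop := out = cummax_alt xs
instance (xs : List Int) (out : List Int) : Decidable (Spec_cummax xs out) := by unfold Spec_cummax; infer_instance

-- ===== CLAIM (what is proved, stated in full; the proofs are below) =====
def Claim_equal_cummax : Prop := ∀ (xs : List Int), Dom_cummax xs → Spec_cummax xs (cummax xs)

-- ===== LEMMAS AND PROOFS =====

/-- common reference: cumulative maximum continuing from running max `m` -/
def cmRef (m : Int) : List Int → List Int
  | [] => []
  | x :: t => (max m x) :: cmRef (max m x) t

theorem ite_gt_eq_max (m x : Int) : (if x > m then x else m) = max m x := by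
  rw [max_def]
  split_ifs <;> omega

theorem cummax_loop (l : List Int) : ∀ (out : List Int) (m : Int),
    (l.foldl (fun (st : List Int × Option Int) x =>
      let m : Int := match st.2 with
        | none => x
        | some m => if x > m then x else m
      (st.1 ++ [m], some m)) (out, some m)).1 = out ++ cmRef m l := by
  induction l with
  | nil => intro out m; simp [cmRef]
  | cons x t ih =>
      intro out m
      simp only [List.foldl_cons]
      rw [ih]
      simp [cmRef, ite_gt_eq_max]

theorem cummax_eq_cmRef : ∀ (xs : List Int), cummax xs = match xs with
    | [] => []
    | x :: t => x :: cmRef x t := by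
  intro xs
  cases xs with
  | nil => rfl
  | cons x t =>
      show (t.foldl _ ([] ++ [x], some x)).1 = x :: cmRef x t
      rw [cummax_loop]
      simp

/-- B after rewriting pyRange/slice/max? to Nat-indexed prefix folds -/
theorem cummax_alt_eq_fold (xs : List Int) :
    cummax_alt xs = (List.range xs.length).map (fun k =>
      (PySem.List.max? (xs.take (k + 1)) (fun y => y)).getD 0) := by
  unfold cummax_alt
  rw [PySem.List.pyRange_one]
  simp only [sub_zero, Int.toNat_natCast, List.map_map]
  apply List.map_congr_left
  intro k _
  have : (0 : Int) + (k : Int) + 1 = ((k + 1 : Nat) : Int) := by push_cast; ring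
  simp only [Function.comp, this, PySem.List.slice_to_natCast]

theorem fold_take_eq_cmRef : ∀ (t : List Int) (x : Int),
    (List.range (t.length + 1)).map (fun k =>
      (PySem.List.max? ((x :: t).take (k + 1)) (fun y => y)).getD 0) = x :: cmRef x t := by
  intro t
  induction t with
  | nil =>
      intro x
      simp [cmRef, PySem.List.max?_id_cons]
  | cons y t ih =>
      intro x
      rw [List.range_succ_eq_map]
      simp only [List.map_cons, List.map_map]
      have h0 : (PySem.List.max? ((x :: y :: t).take (0 + 1)) (fun y => y)).getD 0 = x := by
        simp [PySem.List.max?_id_cons]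
      rw [h0]
      simp only [List.length_cons]
      have h1 : ((List.range (t.length + 1)).map
          ((fun k => (PySem.List.max? ((x :: y :: t).take (k + 1)) (fun y => y)).getD 0) ∘ Nat.succ))
          = (List.range (t.length + 1)).map (fun k =>
            (PySem.List.max? ((max x y :: t).take (k + 1)) (fun y => y)).getD 0) := by
        apply List.map_congr_left
        intro k _
        simp only [Function.comp, List.take_succ_cons, PySem.List.max?_id_cons,
          List.foldl_cons, Option.getD_some]
      rw [h1, ih (max x y)]
      simp [cmRef]

-- ===== VERDICT (by name: the statement is the Claim_ definition above) =====
theorem cummax_spec : Claim_equal_cummax := by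
  intro xs _
  show cummax xs = cummax_alt xs
  rw [cummax_eq_cmRef, cummax_alt_eq_fold]
  cases xs with
  | nil => simp
  | cons x t =>
      simpa using (fold_take_eq_cmRef t x).symm
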